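-- pv_equiv track=rewrite | github.com/mvrl/VectorSynth | scripts/utils.py | find_tag_index
-- ===== SOURCE A (Python) =====
-- def find_tag_index(taglist, target):
--     """
--     Find the index of a tuple in taglist:
--     - If (target,) exists, return its index.
--     - Otherwise, return the index of the tuple containing target
--       with the fewest extra numbers.
--     - If no tuple contains target, return None.
--     """
--     # Try exact match first
--     try:
--         return taglist.index((target,))
--     except ValueError:
--         # Find all tuples that contain target
--         candidates = [(i, t) for i, t in enumerate(taglist) if target in t]
--
--         if candidates:
--             # Pick the one with the shortest length
--             idx, _ = min(candidates, key=lambda x: len(x[1]))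
--             return idx
--         else:
--             return None
-- ===== SOURCE B (Python) =====
-- def find_tag_index(taglist, target):
--     best_idx = None
--     best_len = None
--     for i, t in enumerate(taglist):
--         if target in t and (best_len is None or len(t) < best_len):
--             best_idx = i
--             best_len = len(t)
--     return best_idx
-- ===== Notes on version B (the rewrite author's own statement) =====
-- stated objective: simpler
-- what changed: Replaces A's try/except exact-match lookup plus a candidate comprehension plus a keyed min() with one pass that tracks the earliest containing tuple of strictly minimal length (a length-1 containing tuple is exactly (target,)).
import Mathlib
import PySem

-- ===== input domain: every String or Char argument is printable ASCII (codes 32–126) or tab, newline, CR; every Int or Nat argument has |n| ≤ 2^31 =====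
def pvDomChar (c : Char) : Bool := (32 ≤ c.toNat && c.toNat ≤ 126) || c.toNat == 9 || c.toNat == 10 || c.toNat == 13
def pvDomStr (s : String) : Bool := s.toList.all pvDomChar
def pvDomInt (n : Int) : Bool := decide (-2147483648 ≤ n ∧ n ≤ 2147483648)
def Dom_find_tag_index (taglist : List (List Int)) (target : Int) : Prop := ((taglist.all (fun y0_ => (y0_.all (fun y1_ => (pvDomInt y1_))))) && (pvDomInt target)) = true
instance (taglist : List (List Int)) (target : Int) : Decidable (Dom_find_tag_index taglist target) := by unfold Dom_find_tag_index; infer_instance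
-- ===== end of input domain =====

-- B replaces A's exact-match lookup + candidate comprehension + keyed min() with one pass keeping
-- the earliest containing tuple of strictly minimal length (objective: simpler).

-- ===== PORT A =====
def find_tag_index (taglist : List (List Int)) (target : Int) : Option Int :=
  match PySem.List.index? taglist [target] with
  | some i => some (i : Int)
  | none =>
    let candidates := (PySem.List.enumerate taglist).filter (fun p => p.2.contains target)
    match PySem.List.min? candidates (fun x => (x.2.length : Int)) with
    | some p => some p.1
    | none => none

-- ===== PORT B =====
def find_tag_index_alt (taglist : List (List Int)) (target : Int) : Option Int :=
  ((PySem.List.enumerate taglist).foldl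
    (fun (acc : Option Int × Option Int) p =>
      if p.2.contains target &&
         (match acc.2 with
          | none => true
          | some l => decide ((p.2.length : Int) < l)) then
        (some p.1, some ((p.2.length : Int)))
      else acc)
    (none, none)).1

-- ===== PRECONDITION & SPEC =====
def Spec_find_tag_index (taglist : List (List Int)) (target : Int) (out : Option Int) : Prop := out = find_tag_index_alt taglist target
instance (taglist : List (List Int)) (target : Int) (out : Option Int) : Decidable (Spec_find_tag_index taglist target out) := by unfold Spec_find_tag_index; infer_instance

-- ===== CLAIM (what is proved, stated in full; the proofs are below) =====
def Claim_equal_find_tag_index : Prop := ∀ (taglist : List (List Int)) (target : Int), Dom_find_tag_index taglist target → Spec_find_tag_index taglist target (find_tag_index taglist target)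

-- ===== LEMMAS AND PROOFS =====

-- the min()-fold step of A (first minimal element wins under strict <)
def mstep (m : Option (Int × List Int)) (x : Int × List Int) : Option (Int × List Int) :=
  match m with
  | none => some x
  | some m => if (x.2.length : Int) < (m.2.length : Int) then some x else some m

-- B's fold step
def bstep (target : Int) (acc : Option Int × Option Int) (p : Int × List Int) : Option Int × Option Int :=
  if p.2.contains target &&
     (match acc.2 with
      | none => true
      | some l => decide ((p.2.length : Int) < l)) then
    (some p.1, some ((p.2.length : Int)))
  else acc

theorem min?_eq_foldl_mstep (cs : List (Int × List Int)) :
    PySem.List.min? cs (fun x => (x.2.length : Int)) = cs.foldl mstep none := by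
  unfold PySem.List.min?
  congr 1
  funext a x
  cases a <;> rfl

-- B's accumulated state, started from the projection of a min-fold state, projects the min-fold.
theorem bridge (target : Int) (l : List (Int × List Int)) (m : Option (Int × List Int)) :
    l.foldl (bstep target) (m.map (·.1), m.map (fun p => ((p.2.length : Int))))
      = (fun m => (m.map (·.1), m.map (fun p => ((p.2.length : Int)))))
        (l.foldl (fun a x => if x.2.contains target then mstep a x else a) m) := by
  induction l generalizing m with
  | nil => rfl
  | cons x t ih =>
    simp only [List.foldl_cons]
    by_cases hc : target ∈ x.2
    · cases m with
      | none =>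
        simpa [bstep, mstep, hc] using ih (some x)
      | some m0 =>
        by_cases hlt : x.2.length < m0.2.length
        · simpa [bstep, mstep, hc, hlt] using ih (some x)
        · simpa [bstep, mstep, hc, hlt] using ih (some m0)
    · simpa [bstep, hc] using ih m

theorem B_char (taglist : List (List Int)) (target : Int) :
    find_tag_index_alt taglist target
      = (((PySem.List.enumerate taglist).filter (fun p => p.2.contains target)).foldl mstep none).map (·.1) := by
  have h := bridge target (PySem.List.enumerate taglist) none
  simp only [Option.map_none] at h
  unfold find_tag_index_alt
  rw [show (fun (acc : Option Int × Option Int) (p : Int × List Int) =>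
      if p.2.contains target &&
         (match acc.2 with
          | none => true
          | some l => decide ((p.2.length : Int) < l)) then
        (some p.1, some ((p.2.length : Int)))
      else acc) = bstep target from rfl]
  rw [h, List.foldl_filter]

-- after a some-state, the min-fold keeps it if nothing later is strictly shorter
theorem fold_stay (l : List (Int × List Int)) (m : Int × List Int)
    (h : ∀ y ∈ l, ¬ ((y.2.length : Int) < (m.2.length : Int))) :
    l.foldl mstep (some m) = some m := by
  induction l with
  | nil => rfl
  | cons x t ih =>
    have hx := h x (by simp)
    simp only [List.foldl_cons, mstep, if_neg hx]
    exact ih (fun y hy => h y (by simp [hy]))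

-- the min-fold result is the start state or an element of the list
theorem fold_mem (l : List (Int × List Int)) (m : Option (Int × List Int)) :
    l.foldl mstep m = m ∨ ∃ y ∈ l, l.foldl mstep m = some y := by
  induction l generalizing m with
  | nil => exact Or.inl rfl
  | cons x t ih =>
    simp only [List.foldl_cons]
    have hstep : mstep m x = m ∨ mstep m x = some x := by
      cases m with
      | none => exact Or.inr rfl
      | some m0 => by_cases hlt : (x.2.length : Int) < (m0.2.length : Int) <;> simp [mstep, hlt]
    rcases ih (mstep m x) with h | ⟨y, hy, h⟩
    · rcases hstep with h2 | h2
      · exact Or.inl (h.trans h2)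
      · exact Or.inr ⟨x, by simp, h.trans h2⟩
    · exact Or.inr ⟨y, by simp [hy], h⟩

theorem len_ge_two {target : Int} {t : List Int} (hmem : target ∈ t) (hne : t ≠ [target]) :
    2 ≤ t.length := by
  match t with
  | [] => simp at hmem
  | [a] =>
    simp only [List.mem_singleton] at hmem
    exact absurd (by rw [hmem]) hne
  | a :: b :: r => simp [List.length]

theorem find_tag_index_spec' (taglist : List (List Int)) (target : Int) :
    find_tag_index taglist target = find_tag_index_alt taglist target := by
  rw [B_char]
  unfold find_tag_index
  cases hidx : PySem.List.index? taglist [target] with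
  | none =>
    simp only [min?_eq_foldl_mstep]
    cases (((PySem.List.enumerate taglist).filter (fun p => p.2.contains target)).foldl mstep none) <;> rfl
  | some i =>
    rw [PySem.List.index?_eq_some_iff] at hidx
    obtain ⟨pre, suf, htl, hlen, hnotin⟩ := hidx
    subst htl
    simp only [PySem.List.enumerate_append, List.filter_append]
    have henumc : PySem.List.enumerate ([target] :: suf) (0 + (pre.length : Int))
        = ((pre.length : Int), [target]) :: PySem.List.enumerate suf ((pre.length : Int) + 1) := by
      rw [PySem.List.enumerate_cons]; ring_nf
    rw [henumc]
    have hfc : List.filter (fun p => p.2.contains target)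
          (((pre.length : Int), [target]) :: PySem.List.enumerate suf ((pre.length : Int) + 1))
        = ((pre.length : Int), [target]) ::
          (PySem.List.enumerate suf ((pre.length : Int) + 1)).filter (fun p => p.2.contains target) := by
      rw [List.filter_cons_of_pos (by simp)]
    rw [hfc]
    set as := (PySem.List.enumerate pre 0).filter (fun p => p.2.contains target) with has
    set bs := (PySem.List.enumerate suf ((pre.length : Int) + 1)).filter (fun p => p.2.contains target) with hbs
    set x : Int × List Int := ((pre.length : Int), [target]) with hx
    rw [List.foldl_append]
    -- every candidate from pre is strictly longer than [target]
    have has_long : ∀ y ∈ as, 2 ≤ y.2.length := by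
      intro y hy
      rw [has, List.mem_filter] at hy
      obtain ⟨hyE, hyc⟩ := hy
      rw [PySem.List.mem_enumerate_iff] at hyE
      obtain ⟨k, hk, hyk⟩ := hyE
      have hmem : target ∈ y.2 := List.contains_iff_mem.mp hyc
      have hne : y.2 ≠ [target] := by
        intro hEq
        exact hnotin (hEq ▸ (hyk ▸ List.getElem_mem hk))
      exact len_ge_two hmem hne
    -- every candidate from suf is nonempty
    have hbs_pos : ∀ y ∈ bs, 1 ≤ y.2.length := by
      intro y hy
      rw [hbs, List.mem_filter] at hy
      have hmem : target ∈ y.2 := List.contains_iff_mem.mp hy.2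
      cases hy2 : y.2 with
      | nil => rw [hy2] at hmem; simp at hmem
      | cons a r => simp
    -- folding as gives none or some long candidate; the step at x then yields some x
    have hmid : mstep (as.foldl mstep none) x = some x := by
      rcases fold_mem as none with h | ⟨y, hy, h⟩
      · rw [h]; rfl
      · rw [h]
        have hy2 := has_long y hy
        simp only [mstep, hx, List.length_singleton]
        rw [if_pos (by omega)]
    rw [List.foldl_cons, hmid]
    rw [fold_stay bs x (by
      intro y hy
      have hy1 := hbs_pos y hy
      simp only [hx, List.length_singleton]
      omega)]
    simp [hx, hlen]

-- ===== VERDICT (by name: the statement is the Claim_ definition above) =====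
theorem find_tag_index_spec : Claim_equal_find_tag_index := by
  intro taglist target _
  exact find_tag_index_spec' taglist target
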